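-- pv_equiv track=rewrite | github.com/Lightblues/Leetcode | interview-list/230909-美团/4.py | brust
-- ===== SOURCE A (Python) =====
-- mod = 10**9+7
--
-- def brust(arr):
--     n = len(arr)
--     ans = 0
--     for i in range(len(arr)):
--         for j in range(i+1, len(arr)):
--             ans += (arr[i]^arr[j]) * (i+1) * (n-j)
--             ans %= mod
--     return ans
-- ===== SOURCE B (Python) =====
-- def brust(arr):
--     # Per-bit decomposition with running prefix sums: O(33*n) instead of A's O(n^2).
--     # For |x| <= 2^31, x^y equals sum over bits b<33 of w_b * [bit_b(x) != bit_b(y)]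
--     # in 33-bit two's complement, with w_b = 2^b for b < 32 and w_32 = -2^32.
--     n = len(arr)
--     total = 0
--     for b in range(33):
--         w = -(1 << 32) if b == 32 else (1 << b)
--         p0 = 0
--         p1 = 0
--         s = 0
--         for j, x in enumerate(arr):
--             if (x >> b) & 1:
--                 s += (n - j) * p0
--                 p1 += j + 1
--             else:
--                 s += (n - j) * p1
--                 p0 += j + 1
--         total += w * s
--     return total % (10**9 + 7)
-- ===== Notes on version B (the rewrite author's own statement) =====
-- stated objective: faster
-- what changed: Replaced the O(n^2) double loop over pairs by a per-bit decomposition of the XOR (33 two's-complement bits cover |x| <= 2^31): for each bit one linear pass keeps running prefix sums of the positional weights (i+1) split by bit value, so the pairwise sum is computed in O(33*n).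
import Mathlib
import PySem

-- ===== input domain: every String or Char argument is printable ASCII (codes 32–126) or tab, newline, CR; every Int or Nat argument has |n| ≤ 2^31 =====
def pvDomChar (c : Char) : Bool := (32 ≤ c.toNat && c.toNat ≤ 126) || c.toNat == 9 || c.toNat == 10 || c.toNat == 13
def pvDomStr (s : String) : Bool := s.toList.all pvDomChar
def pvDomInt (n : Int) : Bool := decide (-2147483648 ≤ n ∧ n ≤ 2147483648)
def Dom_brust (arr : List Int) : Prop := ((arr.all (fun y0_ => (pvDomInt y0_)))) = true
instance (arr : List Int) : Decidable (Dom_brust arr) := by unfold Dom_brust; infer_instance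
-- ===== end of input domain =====

-- B replaces A's O(n^2) pairwise loop by a per-bit decomposition of the XOR (33 two's-complement
-- bits) with running prefix sums of positional weights: objective 'faster'.


-- ===== PORT A =====
-- literal port of A: double loop over pairs i < j, accumulating
-- (arr[i]^arr[j])*(i+1)*(n-j) with `ans %= mod` after every step
def brust (arr : List Int) : Int :=
  let n : Int := arr.length
  (PySem.List.pyRange 0 n 1).foldl (fun ans i =>
    (PySem.List.pyRange (i + 1) n 1).foldl (fun ans j =>
      PySem.Int.mod
        (ans + PySem.Int.bxor (PySem.List.pyGetD arr i 0) (PySem.List.pyGetD arr j 0)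
              * (i + 1) * (n - j)) 1000000007) ans) 0

-- ===== PORT B =====
-- body of B's inner `for j, x in enumerate(arr)` loop: state (p0, p1, s)
def bstep (b : Int) (n : Int) (st : Int × Int × Int) (jx : Int × Int) : Int × Int × Int :=
  if PySem.Int.band (jx.2 >>> b.toNat) 1 ≠ 0 then
    (st.1, st.2.1 + (jx.1 + 1), st.2.2 + (n - jx.1) * st.1)
  else
    (st.1 + (jx.1 + 1), st.2.1, st.2.2 + (n - jx.1) * st.2.1)

def brust_alt (arr : List Int) : Int :=
  let n : Int := arr.length
  let total := (PySem.List.pyRange 0 33 1).foldl (fun (total : Int) (b : Int) =>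
    let w : Int := if b = 32 then -(1 <<< 32) else 1 <<< b.toNat
    let res := (PySem.List.enumerate arr 0).foldl (bstep b n) (0, 0, 0)
    total + w * res.2.2) 0
  PySem.Int.mod total 1000000007

-- ===== PRECONDITION & SPEC =====
def Spec_brust (arr : List Int) (out : Int) : Prop := out = brust_alt arr
instance (arr : List Int) (out : Int) : Decidable (Spec_brust arr out) := by unfold Spec_brust; infer_instance

-- ===== CLAIM (what is proved, stated in full; the proofs are below) =====
def Claim_equal_brust : Prop := ∀ (arr : List Int), Dom_brust arr → Spec_brust arr (brust arr)

-- ===== LEMMAS AND PROOFS =====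

-- bit b of x in Python semantics: `(x >> b) & 1` is nonzero
def bitB (b : Nat) (x : Int) : Bool := decide (PySem.Int.band (x >>> b) 1 ≠ 0)

-- 0/1 indicator that bit b of x and y differ
def dif (b : Nat) (x y : Int) : Int := if bitB b x = bitB b y then 0 else 1

-- B's per-bit weight (33-bit two's complement: top bit counts negative)
def wgt (b : Nat) : Int := if b = 32 then -4294967296 else 2 ^ b

-- x reduced to its 33-bit two's-complement representative
def u33 (x : Int) : Nat := (x % 8589934592).toNat

-- the pair sum A accumulates (j-outer normal form)
def pairS (arr : List Int) : Int :=
  ∑ j ∈ Finset.range arr.length, ∑ i ∈ Finset.range j,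
    PySem.Int.bxor (arr.getD i 0) (arr.getD j 0) * ((i : Int) + 1) * ((arr.length : Int) - j)

-- the per-bit pair sum B accumulates
def bitT (b : Nat) (arr : List Int) : Int :=
  ∑ j ∈ Finset.range arr.length, ∑ i ∈ Finset.range j,
    dif b (arr.getD i 0) (arr.getD j 0) * ((i : Int) + 1) * ((arr.length : Int) - j)

-- generic: a foldl that reduces mod 1000000007 at every step computes the reduced sum
theorem foldl_mod_sum (C : Int → Int) (F : Int → Int → Int)
    (hF : ∀ ans i, 0 ≤ ans → ans < 1000000007 → F ans i = (ans + C i) % 1000000007) :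
    ∀ (idxs : List Int) (a : Int), 0 ≤ a → a < 1000000007 →
      idxs.foldl F a = (a + (idxs.map C).sum) % 1000000007 := by
  intro idxs
  induction idxs with
  | nil => intro a h0 h1; simp [Int.emod_eq_of_lt h0 h1]
  | cons x t ih =>
      intro a h0 h1
      simp only [List.foldl_cons, List.map_cons, List.sum_cons]
      rw [hF _ _ h0 h1,
        ih _ (Int.emod_nonneg _ (by norm_num)) (Int.emod_lt_of_pos _ (by norm_num)),
        Int.emod_add_emod, ← add_assoc]

-- bridge: sum of a map over List.range is a Finset.range sum
theorem list_range_sum (f : Nat → Int) (n : Nat) :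
    ((List.range n).map f).sum = ∑ k ∈ Finset.range n, f k := by
  induction n with
  | zero => simp
  | succ m ih =>
      rw [List.range_succ, Finset.sum_range_succ, List.map_append, List.sum_append, ih]; simp

-- ----- characterisation of A -----
theorem A_char (arr : List Int) : brust arr = pairS arr % 1000000007 := by
  have hrfl : brust arr =
      (PySem.List.pyRange 0 (arr.length : Int) 1).foldl (fun ans i =>
        (PySem.List.pyRange (i + 1) (arr.length : Int) 1).foldl (fun ans j =>
          PySem.Int.mod
            (ans + PySem.Int.bxor (PySem.List.pyGetD arr i 0) (PySem.List.pyGetD arr j 0)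
                  * (i + 1) * ((arr.length : Int) - j)) 1000000007) ans) 0 := rfl
  set g : Int → Int → Int := fun i j =>
    PySem.Int.bxor (PySem.List.pyGetD arr i 0) (PySem.List.pyGetD arr j 0)
      * (i + 1) * ((arr.length : Int) - j) with hg
  set C : Int → Int := fun i =>
    ((PySem.List.pyRange (i + 1) (arr.length : Int) 1).map (g i)).sum with hC
  have houter : brust arr = ((0 : Int) +
      ((PySem.List.pyRange 0 (arr.length : Int) 1).map C).sum) % 1000000007 := by
    rw [hrfl]
    refine foldl_mod_sum C _ ?_ _ 0 (by norm_num) (by norm_num)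
    intro ans i h0 h1
    refine foldl_mod_sum (g i) _ ?_ _ ans h0 h1
    intro a j _ _
    rw [PySem.Int.mod_eq_emod_of_pos (by norm_num)]
  rw [houter, zero_add]
  congr 1
  -- turn the list-of-lists sum into the Finset double sum, then exchange the order
  rw [PySem.List.pyRange_one 0 (arr.length : Int), List.map_map]
  have hlen : ((arr.length : Int) - 0).toNat = arr.length := by omega
  rw [hlen, list_range_sum]
  have hinner : ∀ k ∈ Finset.range arr.length,
      (C ∘ fun t : Nat => (0 : Int) + t) k =
        ∑ j ∈ Finset.Ico (k + 1) arr.length,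
          PySem.Int.bxor (arr.getD k 0) (arr.getD j 0) * ((k : Int) + 1) * ((arr.length : Int) - j) := by
    intro k hk
    have hk' : k < arr.length := Finset.mem_range.mp hk
    simp only [Function.comp, zero_add, hC]
    rw [PySem.List.pyRange_one ((k : Int) + 1) (arr.length : Int), List.map_map, list_range_sum,
      Finset.sum_Ico_eq_sum_range]
    have hlen2 : ((arr.length : Int) - ((k : Int) + 1)).toNat = arr.length - (k + 1) := by omega
    rw [hlen2]
    refine Finset.sum_congr rfl ?_
    intro t _
    simp only [Function.comp, hg]
    have hcast : (k : Int) + 1 + (t : Int) = ((k + 1 + t : Nat) : Int) := by push_cast; ring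
    rw [hcast, PySem.List.pyGetD_natCast, PySem.List.pyGetD_natCast]
  rw [Finset.sum_congr rfl hinner]
  rw [Finset.sum_comm' (s' := fun j => Finset.range j) (t' := Finset.range arr.length)
    (by intro i j; simp only [Finset.mem_range, Finset.mem_Ico]; omega)]
  unfold pairS
  exact rfl

-- ----- inner-loop invariant for B -----
theorem bstep_fold (β : Nat) (n : Int) :
    ∀ (l : List Int) (j0 p0 p1 s : Int),
      (PySem.List.enumerate l j0).foldl (bstep (β : Int) n) (p0, p1, s) =
        (p0 + ∑ k ∈ Finset.range l.length, (if bitB β (l.getD k 0) then 0 else j0 + k + 1),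
         p1 + ∑ k ∈ Finset.range l.length, (if bitB β (l.getD k 0) then j0 + k + 1 else 0),
         s + ∑ k ∈ Finset.range l.length, (n - (j0 + k)) *
            ((if bitB β (l.getD k 0) then p0 else p1)
             + ∑ i ∈ Finset.range k,
                 (if bitB β (l.getD i 0) = bitB β (l.getD k 0) then 0 else j0 + i + 1))) := by
  intro l
  induction l with
  | nil => intro j0 p0 p1 s; simp [PySem.List.enumerate]
  | cons x t ih =>
      intro j0 p0 p1 s
      rw [PySem.List.enumerate_cons, List.foldl_cons]
      have hstep : bstep (β : Int) n (p0, p1, s) (j0, x) =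
          if bitB β x then (p0, p1 + (j0 + 1), s + (n - j0) * p0)
          else (p0 + (j0 + 1), p1, s + (n - j0) * p1) := by
        unfold bstep bitB
        simp only [Int.toNat_natCast]
        split_ifs with h1 h2 h2 <;> simp_all
      rw [hstep]
      by_cases hx : bitB β x
      · rw [if_pos hx, ih]
        refine Prod.ext ?_ (Prod.ext ?_ ?_) <;>
          simp only [List.length_cons, List.getD_cons_zero, List.getD_cons_succ,
            Finset.sum_range_succ' _ t.length, hx, reduceIte, Finset.range_zero,
            Finset.sum_empty, Nat.cast_zero, add_zero, zero_add]
        · have hc : ∀ k ∈ Finset.range t.length,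
              (if bitB β (t.getD k 0) = true then (0 : Int) else j0 + ((k : Nat) + 1 : Nat) + 1)
                = (if bitB β (t.getD k 0) = true then 0 else j0 + 1 + (k : Int) + 1) := by
            intro k _; split_ifs <;> omega
          rw [Finset.sum_congr rfl hc]
          try push_cast
          try ring
        · have hc : ∀ k ∈ Finset.range t.length,
              (if bitB β (t.getD k 0) = true then j0 + ((k : Nat) + 1 : Nat) + 1 else (0 : Int))
                = (if bitB β (t.getD k 0) = true then j0 + 1 + (k : Int) + 1 else 0) := by
            intro k _; split_ifs <;> omega
          rw [Finset.sum_congr rfl hc]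
          try push_cast
          try ring
        · have hc : ∀ k ∈ Finset.range t.length,
              (n - (j0 + ((k : Nat) + 1 : Nat))) * ((if bitB β (t.getD k 0) = true then p0 else p1)
                  + ∑ i ∈ Finset.range (k + 1),
                      (if bitB β ((x :: t).getD i 0) = bitB β (t.getD k 0) then (0 : Int) else j0 + (i : Int) + 1))
                = (n - (j0 + 1 + (k : Int))) * ((if bitB β (t.getD k 0) = true then p0 else p1 + (j0 + 1))
                  + ∑ i ∈ Finset.range k,
                      (if bitB β (t.getD i 0) = bitB β (t.getD k 0) then (0 : Int) else j0 + 1 + (i : Int) + 1)) := by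
            intro k _
            rw [Finset.sum_range_succ' _ k]
            simp only [List.getD_cons_zero, List.getD_cons_succ, hx]
            have hinner : ∀ i ∈ Finset.range k,
                (if bitB β (t.getD i 0) = bitB β (t.getD k 0) then (0 : Int) else j0 + ((i : Nat) + 1 : Nat) + 1)
                  = (if bitB β (t.getD i 0) = bitB β (t.getD k 0) then 0 else j0 + 1 + (i : Int) + 1) := by
              intro i _; split_ifs <;> omega
            rw [Finset.sum_congr rfl hinner]
            cases hbk : bitB β (t.getD k 0) <;>
              simp only [hbk, reduceIte, Finset.range_zero, Finset.sum_empty, Nat.cast_zero,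
                add_zero, zero_add] <;> push_cast <;> ring
          rw [Finset.sum_congr rfl hc]
          try push_cast
          try ring
      · rw [if_neg hx, ih]
        rw [Bool.not_eq_true] at hx
        refine Prod.ext ?_ (Prod.ext ?_ ?_) <;>
          simp only [List.length_cons, List.getD_cons_zero, List.getD_cons_succ,
            Finset.sum_range_succ' _ t.length, hx, reduceIte, Finset.range_zero,
            Finset.sum_empty, Nat.cast_zero, add_zero, zero_add]
        · have hc : ∀ k ∈ Finset.range t.length,
              (if bitB β (t.getD k 0) = true then (0 : Int) else j0 + ((k : Nat) + 1 : Nat) + 1)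
                = (if bitB β (t.getD k 0) = true then 0 else j0 + 1 + (k : Int) + 1) := by
            intro k _; split_ifs <;> omega
          rw [Finset.sum_congr rfl hc]
          try push_cast
          try ring
        · have hc : ∀ k ∈ Finset.range t.length,
              (if bitB β (t.getD k 0) = true then j0 + ((k : Nat) + 1 : Nat) + 1 else (0 : Int))
                = (if bitB β (t.getD k 0) = true then j0 + 1 + (k : Int) + 1 else 0) := by
            intro k _; split_ifs <;> omega
          rw [Finset.sum_congr rfl hc]
          try push_cast
          try ring
        · have hc : ∀ k ∈ Finset.range t.length,
              (n - (j0 + ((k : Nat) + 1 : Nat))) * ((if bitB β (t.getD k 0) = true then p0 else p1)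
                  + ∑ i ∈ Finset.range (k + 1),
                      (if bitB β ((x :: t).getD i 0) = bitB β (t.getD k 0) then (0 : Int) else j0 + (i : Int) + 1))
                = (n - (j0 + 1 + (k : Int))) * ((if bitB β (t.getD k 0) = true then p0 + (j0 + 1) else p1)
                  + ∑ i ∈ Finset.range k,
                      (if bitB β (t.getD i 0) = bitB β (t.getD k 0) then (0 : Int) else j0 + 1 + (i : Int) + 1)) := by
            intro k _
            rw [Finset.sum_range_succ' _ k]
            simp only [List.getD_cons_zero, List.getD_cons_succ, hx]
            have hinner : ∀ i ∈ Finset.range k,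
                (if bitB β (t.getD i 0) = bitB β (t.getD k 0) then (0 : Int) else j0 + ((i : Nat) + 1 : Nat) + 1)
                  = (if bitB β (t.getD i 0) = bitB β (t.getD k 0) then 0 else j0 + 1 + (i : Int) + 1) := by
              intro i _; split_ifs <;> omega
            rw [Finset.sum_congr rfl hinner]
            cases hbk : bitB β (t.getD k 0) <;>
              simp only [hbk, reduceIte, Finset.range_zero, Finset.sum_empty, Nat.cast_zero,
                add_zero, zero_add] <;> push_cast <;> ring
          rw [Finset.sum_congr rfl hc]
          try push_cast
          try ring

-- ----- characterisation of B -----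
theorem B_char (arr : List Int) :
    brust_alt arr = (∑ b ∈ Finset.range 33, wgt b * bitT b arr) % 1000000007 := by
  have hrfl : brust_alt arr = PySem.Int.mod
      ((PySem.List.pyRange 0 33 1).foldl (fun (total : Int) (b : Int) =>
        total + ((if b = 32 then -(1 <<< 32) else 1 <<< b.toNat : Int)) *
          ((PySem.List.enumerate arr 0).foldl (bstep b (arr.length : Int)) (0, 0, 0)).2.2) 0)
      1000000007 := rfl
  rw [hrfl, PySem.Int.mod_eq_emod_of_pos (by norm_num)]
  congr 1
  rw [PySem.List.foldl_add (PySem.List.pyRange 0 33 1)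
      (fun b : Int => ((if b = 32 then -(1 <<< 32) else 1 <<< b.toNat : Int)) *
        ((PySem.List.enumerate arr 0).foldl (bstep b (arr.length : Int)) (0, 0, 0)).2.2) 0,
    zero_add, PySem.List.pyRange_one 0 33, List.map_map]
  rw [show ((33 : Int) - 0).toNat = 33 by rfl, list_range_sum]
  refine Finset.sum_congr rfl ?_
  intro β hβ
  simp only [Function.comp, zero_add]
  have hwt : (if ((β : Int)) = 32 then -(((1 <<< 32 : Nat)) : Int) else (((1 <<< ((β : Int)).toNat : Nat)) : Int))
      = wgt β := by
    rw [Int.toNat_natCast]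
    by_cases h32 : β = 32
    · subst h32
      norm_num [wgt, Nat.shiftLeft_eq]
    · rw [if_neg (by exact_mod_cast h32), wgt, if_neg h32, Nat.shiftLeft_eq, one_mul]
      push_cast
      rfl
  rw [hwt]
  congr 1
  rw [bstep_fold β (arr.length : Int) arr 0 0 0 0]
  simp only [zero_add]
  unfold bitT
  refine Finset.sum_congr rfl ?_
  intro k _
  simp only [ite_self, zero_add]
  rw [Finset.mul_sum]
  refine Finset.sum_congr rfl ?_
  intro i _
  unfold dif
  split_ifs <;> push_cast <;> ring

-- ----- bit-extraction lemmas -----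
theorem xor_pred_pow (k : Nat) : ∀ m : Nat, m < 2 ^ k → ((2 ^ k - 1) ^^^ m) = 2 ^ k - 1 - m := by
  induction k with
  | zero => intro m hm; interval_cases m; simp
  | succ k ih =>
      intro m hm
      have hp : 2 ^ (k + 1) = 2 * 2 ^ k := by rw [pow_succ]; ring
      have h1 : ((2 ^ (k + 1) - 1) ^^^ m) / 2 = 2 ^ k - 1 - m / 2 := by
        rw [Nat.xor_div_two]
        have h2 : (2 ^ (k + 1) - 1) / 2 = 2 ^ k - 1 := by omega
        rw [h2, ih (m / 2) (by omega)]
      have h2 : ((2 ^ (k + 1) - 1) ^^^ m) % 2 = (2 ^ (k + 1) - 1 + m) % 2 := Nat.xor_mod_two_eq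
      omega

theorem bitB_eq_testBit (b : Nat) (hb : b < 33) (x : Int) : bitB b x = (u33 x).testBit b := by
  have hband : PySem.Int.band (x >>> b) 1 = (x / 2 ^ b) % 2 := by
    rw [PySem.Int.band_one, PySem.Int.mod_eq_emod_of_pos (by norm_num),
      Int.shiftRight_eq_div_pow]
    push_cast
    rfl
  have hmod : (x % 8589934592) / 2 ^ b % 2 = (x / 2 ^ b) % 2 := by
    have hsplit : (8589934592 : Int) = (2 ^ (32 - b) * 2) * 2 ^ b := by
      have hb' : 32 - b + 1 + b = 33 := by omega
      calc (8589934592 : Int) = 2 ^ 33 := by norm_num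
        _ = 2 ^ (32 - b + 1 + b) := by rw [hb']
        _ = (2 ^ (32 - b) * 2) * 2 ^ b := by rw [pow_add, pow_add, pow_one]
    have hrw : x % 8589934592
        = x + (-(x / 8589934592) * (2 ^ (32 - b) * 2)) * 2 ^ b := by
      rw [Int.emod_def, hsplit]; ring
    rw [hrw, Int.add_mul_ediv_right _ _ (by positivity : (2 : Int) ^ b ≠ 0)]
    have hrw2 : x / 2 ^ b + -(x / 8589934592) * (2 ^ (32 - b) * 2)
        = x / 2 ^ b + 2 * (-(x / 8589934592) * 2 ^ (32 - b)) := by ring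
    rw [hrw2, Int.add_mul_emod_self_left]
  unfold bitB u33
  rw [hband, Nat.testBit_eq_decide_div_mod_eq, decide_eq_decide]
  have hnn : 0 ≤ x % 8589934592 := Int.emod_nonneg _ (by norm_num)
  have hcast : (((x % 8589934592).toNat / 2 ^ b % 2 : Nat) : Int) = (x % 8589934592) / 2 ^ b % 2 := by
    push_cast [Int.toNat_of_nonneg hnn]
    rfl
  have hiff : ((x % 8589934592).toNat / 2 ^ b % 2 = 1) ↔ ((x % 8589934592) / 2 ^ b % 2 = (1 : Int)) := by
    rw [← hcast]; exact_mod_cast Iff.rfl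
  rw [hiff, hmod]
  omega

theorem bxor_char (x y : Int) (hx : -4294967296 ≤ x ∧ x < 4294967296)
    (hy : -4294967296 ≤ y ∧ y < 4294967296) :
    PySem.Int.bxor x y = ((u33 x ^^^ u33 y : Nat) : Int)
      - 8589934592 * (((u33 x ^^^ u33 y) / 4294967296 : Nat) : Int) := by
  have hA : (2 : Nat) ^ 33 = 8589934592 := by norm_num
  have hH : (2 : Nat) ^ 32 = 4294967296 := by norm_num
  have hupos : ∀ z : Int, 0 ≤ z → z < 4294967296 → (u33 z : Int) = z := by
    intro z h0 h1; unfold u33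
    rw [Int.emod_eq_of_lt h0 (by omega), Int.toNat_of_nonneg h0]
  have huneg : ∀ z : Int, -4294967296 ≤ z → z < 0 → (u33 z : Int) = z + 8589934592 := by
    intro z h0 h1; unfold u33
    have h2 := Int.add_mul_emod_self_left z 8589934592 1
    rw [mul_one] at h2
    rw [← h2, Int.emod_eq_of_lt (by omega) (by omega), Int.toNat_of_nonneg (by omega)]
  unfold PySem.Int.bxor
  by_cases hx0 : 0 ≤ x <;> by_cases hy0 : 0 ≤ y
  · rw [if_pos hx0, if_pos hy0]
    have hxu : u33 x = x.toNat := by have := hupos x hx0 hx.2; omega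
    have hyu : u33 y = y.toNat := by have := hupos y hy0 hy.2; omega
    have hw : u33 x ^^^ u33 y < 4294967296 := by
      rw [hxu, hyu]
      have := Nat.xor_lt_two_pow (x := x.toNat) (y := y.toNat) (n := 32) (by omega) (by omega)
      omega
    have hdiv : (u33 x ^^^ u33 y) / 4294967296 = 0 := Nat.div_eq_of_lt hw
    rw [hdiv, hxu, hyu]
    push_cast; ring
  · rw [if_pos hx0, if_neg hy0]
    have hxu : u33 x = x.toNat := by have := hupos x hx0 hx.2; omega
    have hny : ((-y - 1).toNat : Int) = -y - 1 := Int.toNat_of_nonneg (by omega)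
    have hyu : u33 y = 8589934592 - 1 - (-y - 1).toNat := by
      have hy0' : y < 0 := by omega
      have := huneg y hy.1 hy0'; omega
    set nx := x.toNat with hnx
    set ny := (-y - 1).toNat with hnyd
    have hnxb : nx < 4294967296 := by omega
    have hnyb : ny < 4294967296 := by omega
    have hxor32 : nx ^^^ ny < 4294967296 := by
      have := Nat.xor_lt_two_pow (x := nx) (y := ny) (n := 32) (by omega) (by omega)
      omega
    have hw : u33 x ^^^ u33 y = 8589934592 - 1 - (nx ^^^ ny) := by
      rw [hxu, hyu]
      have e1 : (8589934592 : Nat) - 1 - ny = (2 ^ 33 - 1) ^^^ ny := by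
        rw [xor_pred_pow 33 ny (by omega), hA]
      rw [e1, Nat.xor_left_comm, xor_pred_pow 33 (nx ^^^ ny) (by omega), hA]
    have hdiv : (u33 x ^^^ u33 y) / 4294967296 = 1 := by
      apply Nat.div_eq_of_lt_le <;> omega
    rw [hw] at hdiv
    rw [hw, hdiv]
    have hc : ((8589934592 - 1 - (nx ^^^ ny) : Nat) : Int) = 8589934592 - 1 - ((nx ^^^ ny : Nat) : Int) := by
      omega
    rw [hc]
    push_cast; ring_nf
  · rw [if_neg hx0, if_pos hy0]
    have hyu : u33 y = y.toNat := by have := hupos y hy0 hy.2; omega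
    have hnx : ((-x - 1).toNat : Int) = -x - 1 := Int.toNat_of_nonneg (by omega)
    have hxu : u33 x = 8589934592 - 1 - (-x - 1).toNat := by
      have hx0' : x < 0 := by omega
      have := huneg x hx.1 hx0'; omega
    set nx := (-x - 1).toNat with hnxd
    set ny := y.toNat with hnyd
    have hnxb : nx < 4294967296 := by omega
    have hnyb : ny < 4294967296 := by omega
    have hxor32 : nx ^^^ ny < 4294967296 := by
      have := Nat.xor_lt_two_pow (x := nx) (y := ny) (n := 32) (by omega) (by omega)
      omega
    have hw : u33 x ^^^ u33 y = 8589934592 - 1 - (nx ^^^ ny) := by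
      rw [hxu, hyu]
      have e1 : (8589934592 : Nat) - 1 - nx = (2 ^ 33 - 1) ^^^ nx := by
        rw [xor_pred_pow 33 nx (by omega), hA]
      rw [e1, Nat.xor_assoc, xor_pred_pow 33 (nx ^^^ ny) (by omega), hA]
    have hdiv : (u33 x ^^^ u33 y) / 4294967296 = 1 := by
      apply Nat.div_eq_of_lt_le <;> omega
    rw [hw] at hdiv
    rw [hw, hdiv]
    have hc : ((8589934592 - 1 - (nx ^^^ ny) : Nat) : Int) = 8589934592 - 1 - ((nx ^^^ ny : Nat) : Int) := by
      omega
    rw [hc]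
    push_cast; ring_nf
  · rw [if_neg hx0, if_neg hy0]
    have hnx : ((-x - 1).toNat : Int) = -x - 1 := Int.toNat_of_nonneg (by omega)
    have hny : ((-y - 1).toNat : Int) = -y - 1 := Int.toNat_of_nonneg (by omega)
    have hxu : u33 x = 8589934592 - 1 - (-x - 1).toNat := by
      have hx0' : x < 0 := by omega
      have := huneg x hx.1 hx0'; omega
    have hyu : u33 y = 8589934592 - 1 - (-y - 1).toNat := by
      have hy0' : y < 0 := by omega
      have := huneg y hy.1 hy0'; omega
    set nx := (-x - 1).toNat with hnxd
    set ny := (-y - 1).toNat with hnyd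
    have hnxb : nx < 4294967296 := by omega
    have hnyb : ny < 4294967296 := by omega
    have hw : u33 x ^^^ u33 y = nx ^^^ ny := by
      rw [hxu, hyu]
      have e1 : (8589934592 : Nat) - 1 - nx = (2 ^ 33 - 1) ^^^ nx := by
        rw [xor_pred_pow 33 nx (by omega), hA]
      have e2 : (8589934592 : Nat) - 1 - ny = (2 ^ 33 - 1) ^^^ ny := by
        rw [xor_pred_pow 33 ny (by omega), hA]
      rw [e1, e2, Nat.xor_comm (2 ^ 33 - 1) nx, Nat.xor_assoc,
        ← Nat.xor_assoc (2 ^ 33 - 1) (2 ^ 33 - 1) ny, Nat.xor_self, Nat.zero_xor]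
    have hxor32 : nx ^^^ ny < 4294967296 := by
      have := Nat.xor_lt_two_pow (x := nx) (y := ny) (n := 32) (by omega) (by omega)
      omega
    have hdiv : (u33 x ^^^ u33 y) / 4294967296 = 0 := by
      rw [hw]; exact Nat.div_eq_of_lt hxor32
    rw [hw] at hdiv
    rw [hw, hdiv]
    push_cast; ring

theorem sum_bits (k : Nat) :
    ∀ w : Nat, w < 2 ^ k →
      (∑ b ∈ Finset.range k, (2 ^ b : Int) * (if w.testBit b then 1 else 0)) = w := by
  induction k with
  | zero =>
      intro w hw
      have hw0 : w = 0 := by simpa using hw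
      subst hw0; simp
  | succ k ih =>
      intro w hw
      rw [Finset.sum_range_succ' (fun b => (2 ^ b : Int) * (if w.testBit b then 1 else 0)) k]
      have hrw : ∀ b ∈ Finset.range k,
          (2 ^ (b + 1) : Int) * (if w.testBit (b + 1) then 1 else 0)
            = 2 * ((2 ^ b : Int) * (if (w / 2).testBit b then 1 else 0)) := by
        intro b _
        rw [Nat.testBit_succ]; ring
      rw [Finset.sum_congr rfl hrw, ← Finset.mul_sum,
        ih (w / 2) (by rw [pow_succ] at hw; omega)]
      rw [Nat.testBit_zero]
      rcases (by omega : w % 2 = 0 ∨ w % 2 = 1) with h | h <;> simp [h] <;> push_cast <;> omega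

theorem sum_wgt_bits (w : Nat) (h : w < 2 ^ 33) :
    ∑ b ∈ Finset.range 33, wgt b * (if w.testBit b then 1 else 0)
      = (w : Int) - 8589934592 * ((w / 4294967296 : Nat) : Int) := by
  have hbe := sum_bits 33 w h
  rw [show (33 : Nat) = 32 + 1 from rfl, Finset.sum_range_succ] at hbe ⊢
  have hsub : ∀ b ∈ Finset.range 32,
      wgt b * (if w.testBit b then (1 : Int) else 0)
        = (2 ^ b : Int) * (if w.testBit b then 1 else 0) := by
    intro b hb
    have : b < 32 := Finset.mem_range.mp hb
    rw [wgt, if_neg (by omega)]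
  rw [Finset.sum_congr rfl hsub]
  have h32 : (if w.testBit 32 then (1 : Int) else 0) = ((w / 4294967296 : Nat) : Int) := by
    rw [Nat.testBit_eq_decide_div_mod_eq]
    have hpow : (2 : Nat) ^ 32 = 4294967296 := by norm_num
    have hd : w / 4294967296 = 0 ∨ w / 4294967296 = 1 := by
      have : w < 2 * 4294967296 := by norm_num at h ⊢; omega
      omega
    rcases hd with h' | h' <;> simp [hpow, h']
  rw [h32] at hbe ⊢
  have hwgt32 : wgt 32 = -4294967296 := by rw [wgt, if_pos rfl]
  rw [hwgt32]
  linarith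

theorem xor_decomp (x y : Int) (hx : -4294967296 ≤ x ∧ x < 4294967296)
    (hy : -4294967296 ≤ y ∧ y < 4294967296) :
    ∑ b ∈ Finset.range 33, wgt b * dif b x y = PySem.Int.bxor x y := by
  have hu : ∀ z : Int, u33 z < 2 ^ 33 := by
    intro z
    unfold u33
    have h1 : z % 8589934592 < 8589934592 := Int.emod_lt_of_pos _ (by norm_num)
    have h2 : 0 ≤ z % 8589934592 := Int.emod_nonneg _ (by norm_num)
    omega
  have hw33 : u33 x ^^^ u33 y < 2 ^ 33 := Nat.xor_lt_two_pow (hu x) (hu y)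
  have hrw : ∀ b ∈ Finset.range 33,
      wgt b * dif b x y = wgt b * (if (u33 x ^^^ u33 y).testBit b then 1 else 0) := by
    intro b hb
    have hb' : b < 33 := Finset.mem_range.mp hb
    congr 1
    unfold dif
    rw [bitB_eq_testBit b hb' x, bitB_eq_testBit b hb' y, Nat.testBit_xor]
    cases hxx : (u33 x).testBit b <;> cases hyy : (u33 y).testBit b <;> simp
  rw [Finset.sum_congr rfl hrw, sum_wgt_bits _ hw33, bxor_char x y hx hy]

-- ----- assembling the two characterisations -----
theorem key_sum (arr : List Int) (h : Dom_brust arr) :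
    pairS arr = ∑ b ∈ Finset.range 33, wgt b * bitT b arr := by
  have hbound : ∀ k, k < arr.length →
      -4294967296 ≤ arr.getD k 0 ∧ arr.getD k 0 < 4294967296 := by
    intro k hk
    have hm : arr.getD k 0 ∈ arr := by
      rw [List.getD_eq_getElem arr 0 hk]
      exact List.getElem_mem hk
    have hdom := List.all_eq_true.mp h _ hm
    simp only [pvDomInt, decide_eq_true_eq] at hdom
    omega
  have hA2B : pairS arr = ∑ j ∈ Finset.range arr.length, ∑ i ∈ Finset.range j,
      ∑ b ∈ Finset.range 33, wgt b *
        (dif b (arr.getD i 0) (arr.getD j 0) * ((i : Int) + 1) * ((arr.length : Int) - j)) := by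
    unfold pairS
    refine Finset.sum_congr rfl fun j hj => Finset.sum_congr rfl fun i hi => ?_
    have hjlen : j < arr.length := Finset.mem_range.mp hj
    have hilen : i < arr.length := lt_trans (Finset.mem_range.mp hi) hjlen
    have h1 := hbound i hilen
    have h2 := hbound j hjlen
    rw [show (∑ b ∈ Finset.range 33, wgt b *
          (dif b (arr.getD i 0) (arr.getD j 0) * ((i : Int) + 1) * ((arr.length : Int) - j)))
        = (∑ b ∈ Finset.range 33, wgt b * dif b (arr.getD i 0) (arr.getD j 0)) *
            (((i : Int) + 1) * ((arr.length : Int) - j)) from by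
      rw [Finset.sum_mul]; exact Finset.sum_congr rfl fun b _ => by ring]
    rw [xor_decomp _ _ h1 h2]
    ring
  have hB2 : (∑ b ∈ Finset.range 33, wgt b * bitT b arr)
      = ∑ j ∈ Finset.range arr.length, ∑ i ∈ Finset.range j,
          ∑ b ∈ Finset.range 33, wgt b *
            (dif b (arr.getD i 0) (arr.getD j 0) * ((i : Int) + 1) * ((arr.length : Int) - j)) := by
    have hone : ∀ b, wgt b * bitT b arr = ∑ j ∈ Finset.range arr.length, ∑ i ∈ Finset.range j,
        wgt b * (dif b (arr.getD i 0) (arr.getD j 0) * ((i : Int) + 1) * ((arr.length : Int) - j)) := by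
      intro b
      unfold bitT
      rw [Finset.mul_sum]
      exact Finset.sum_congr rfl fun j _ => by rw [Finset.mul_sum]
    rw [Finset.sum_congr rfl fun b _ => hone b, Finset.sum_comm]
    exact Finset.sum_congr rfl fun j _ => Finset.sum_comm
  rw [hA2B, hB2]

-- ===== VERDICT (by name: the statement is the Claim_ definition above) =====
theorem brust_spec : Claim_equal_brust := by
  intro arr h
  unfold Spec_brust
  rw [A_char, B_char, key_sum arr h]
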